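-- pv_equiv track=rewrite | github.com/SmithE65/aoc-2025 | python/day01.py | left
-- ===== SOURCE A (Python) =====
-- def left(position, distance):
--     i = abs(distance)
--     result = 0
--     while i > 0:
--         position = (position - 1) % 100
--         if position == 0:
--             result += 1
--         i -= 1
--     return result
-- ===== SOURCE B (Python) =====
-- def left(position, distance):
--     # Closed form: count of k in [1, abs(distance)] with k % 100 == position % 100.
--     n = abs(distance)
--     r = position % 100
--     if r == 0:
--         return n // 100
--     return (n - r) // 100 + 1 if n >= r else 0
-- ===== Notes on version B (the rewrite author's own statement) =====
-- stated objective: faster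
-- what changed: Replaced the O(|distance|) decrement loop by a closed-form count of k in [1,|distance|] with k ≡ position (mod 100).
import Mathlib
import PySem

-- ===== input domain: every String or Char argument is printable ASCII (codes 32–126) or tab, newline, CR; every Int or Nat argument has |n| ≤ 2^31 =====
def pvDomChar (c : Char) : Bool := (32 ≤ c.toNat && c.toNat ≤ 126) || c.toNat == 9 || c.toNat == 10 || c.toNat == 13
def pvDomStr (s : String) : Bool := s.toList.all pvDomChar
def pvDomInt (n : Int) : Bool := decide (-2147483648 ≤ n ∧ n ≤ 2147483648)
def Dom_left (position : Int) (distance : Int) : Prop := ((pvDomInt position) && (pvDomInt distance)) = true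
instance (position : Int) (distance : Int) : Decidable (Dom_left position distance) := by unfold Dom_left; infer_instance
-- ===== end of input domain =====

-- B replaces A's O(|distance|) decrement loop by a closed-form count (objective: faster).

-- ===== PORT A =====
-- the while loop, recursion on the countdown i
def leftLoop : Nat → Int → Int → Int
  | 0, _, result => result
  | i + 1, position, result =>
    let p := PySem.Int.mod (position - 1) 100
    leftLoop i p (if p = 0 then result + 1 else result)

def left (position : Int) (distance : Int) : Int :=
  leftLoop distance.natAbs position 0

-- ===== PORT B =====
def left_alt (position : Int) (distance : Int) : Int :=
  let n : Int := |distance|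
  let r := PySem.Int.mod position 100
  if r = 0 then PySem.Int.floordiv n 100
  else if n ≥ r then PySem.Int.floordiv (n - r) 100 + 1 else 0

-- ===== PRECONDITION & SPEC =====
def Spec_left (position : Int) (distance : Int) (out : Int) : Prop := out = left_alt position distance
instance (position : Int) (distance : Int) (out : Int) : Decidable (Spec_left position distance out) := by unfold Spec_left; infer_instance

-- ===== CLAIM (what is proved, stated in full; the proofs are below) =====
def Claim_equal_left : Prop := ∀ (position : Int) (distance : Int), Dom_left position distance → Spec_left position distance (left position distance)

-- ===== LEMMAS AND PROOFS =====

-- closed form of B, as a function of the step count n and the residue r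
def closedAux (n : Nat) (r : Int) : Int :=
  if r = 0 then (n : Int) / 100
  else if (n : Int) ≥ r then ((n : Int) - r) / 100 + 1 else 0

lemma loop_eq (n : Nat) (p result : Int) :
    leftLoop n p result = result + closedAux n (p.emod 100) := by
  induction n generalizing p result with
  | zero =>
    have h0 : (0:Int) ≤ p.emod 100 := Int.emod_nonneg p (by norm_num)
    have h1 : p.emod 100 < 100 := Int.emod_lt_of_pos p (by norm_num)
    simp only [leftLoop, closedAux, Nat.cast_zero]
    split_ifs <;> omega
  | succ n ih =>
    have hmod : PySem.Int.mod (p - 1) 100 = (p - 1).emod 100 :=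
      PySem.Int.mod_eq_emod_of_pos (by norm_num)
    rw [leftLoop, hmod]
    rw [ih]
    have hself : ((p - 1).emod 100).emod 100 = (p - 1).emod 100 := Int.emod_emod_of_dvd _ dvd_rfl
    rw [hself]
    -- relate residues
    have hr0 : (0:Int) ≤ p.emod 100 := Int.emod_nonneg p (by norm_num)
    have hr1 : p.emod 100 < 100 := Int.emod_lt_of_pos p (by norm_num)
    have hq0 : (0:Int) ≤ (p - 1).emod 100 := Int.emod_nonneg _ (by norm_num)
    have hq1 : (p - 1).emod 100 < 100 := Int.emod_lt_of_pos _ (by norm_num)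
    have hrel : (p - 1).emod 100 = (p.emod 100 - 1).emod 100 := by
      show (p - 1) % 100 = (p % 100 - 1) % 100
      rw [Int.sub_emod p 1 100]
      norm_num
    have hrel' : (p - 1).emod 100 = if p.emod 100 = 0 then 99 else p.emod 100 - 1 := by
      rw [hrel]
      split_ifs with h
      · rw [h]; decide
      · exact Int.emod_eq_of_lt (by omega) (by omega)
    unfold closedAux
    push_cast
    split_ifs <;> omega

lemma floordiv_pos (a : Int) : PySem.Int.floordiv a 100 = a / 100 :=
  PySem.Int.floordiv_eq_ediv_of_pos (by norm_num)

lemma left_eq_alt (position distance : Int) : left position distance = left_alt position distance := by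
  unfold left left_alt
  rw [loop_eq]
  have hmod : PySem.Int.mod position 100 = position.emod 100 :=
    PySem.Int.mod_eq_emod_of_pos (by norm_num)
  have habs : ((distance.natAbs : Nat) : Int) = |distance| := Int.abs_eq_natAbs distance ▸ rfl
  simp only [closedAux, hmod, floordiv_pos, habs, zero_add]

-- ===== VERDICT (by name: the statement is the Claim_ definition above) =====
theorem left_spec : Claim_equal_left := by
  intro p d _
  unfold Spec_left
  exact left_eq_alt p d
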